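-- pv_equiv track=rewrite | github.com/Zfintech89/zencia-web | app.py | process_content_for_layout
-- ===== SOURCE A (Python) =====
-- def process_content_for_layout(content, layout):
--     """Process and truncate content based on layout to prevent overflow"""
--     processed = dict(content)
--
--     if layout == 'titleAndBullets':
--         # Limit title length
--         if 'title' in processed and len(processed['title']) > 80:
--             processed['title'] = processed['title'][:77] + '...'
--
--         # Limit number of bullets and length of each
--         if 'bullets' in processed:
--             # Keep maximum 5 bullets
--             processed['bullets'] = processed['bullets'][:5]
--
--             # Limit length of each bullet
--             processed['bullets'] = [
--                 (bullet[:97] + '...') if len(bullet) > 100 else bullet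
--                 for bullet in processed['bullets']
--             ]
--
--     elif layout == 'quote':
--         # Limit quote length
--         if 'quote' in processed and len(processed['quote']) > 150:
--             processed['quote'] = processed['quote'][:147] + '...'
--
--         # Limit author length
--         if 'author' in processed and len(processed['author']) > 50:
--             processed['author'] = processed['author'][:47] + '...'
--
--     elif layout == 'imageAndParagraph':
--         # Limit title length
--         if 'title' in processed and len(processed['title']) > 80:
--             processed['title'] = processed['title'][:77] + '...'
--
--         # Limit paragraph length
--         if 'paragraph' in processed and len(processed['paragraph']) > 300:
--             processed['paragraph'] = processed['paragraph'][:297] + '...'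
--
--         # Limit image description length
--         if 'imageDescription' in processed and len(processed['imageDescription']) > 100:
--             processed['imageDescription'] = processed['imageDescription'][:97] + '...'
--
--     elif layout == 'twoColumn':
--         # Limit title length
--         if 'title' in processed and len(processed['title']) > 80:
--             processed['title'] = processed['title'][:77] + '...'
--
--         # Limit column titles length
--         if 'column1Title' in processed and len(processed['column1Title']) > 50:
--             processed['column1Title'] = processed['column1Title'][:47] + '...'
--         if 'column2Title' in processed and len(processed['column2Title']) > 50:
--             processed['column2Title'] = processed['column2Title'][:47] + '...'
--
--         # Limit column content length
--         if 'column1Content' in processed and len(processed['column1Content']) > 200: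
--             processed['column1Content'] = processed['column1Content'][:197] + '...'
--         if 'column2Content' in processed and len(processed['column2Content']) > 200:
--             processed['column2Content'] = processed['column2Content'][:197] + '...'
--
--     elif layout == 'titleOnly':
--         # Limit title length
--         if 'title' in processed and len(processed['title']) > 80:
--             processed['title'] = processed['title'][:77] + '...'
--
--         # Limit subtitle length
--         if 'subtitle' in processed and len(processed['subtitle']) > 120:
--             processed['subtitle'] = processed['subtitle'][:117] + '...'
--
--     return processed
-- ===== SOURCE B (Python) =====
-- LAYOUT_LIMITS = {
--     'titleAndBullets': [('title', 80)],
--     'quote': [('quote', 150), ('author', 50)],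
--     'imageAndParagraph': [('title', 80), ('paragraph', 300), ('imageDescription', 100)],
--     'twoColumn': [('title', 80), ('column1Title', 50), ('column2Title', 50),
--                   ('column1Content', 200), ('column2Content', 200)],
--     'titleOnly': [('title', 80), ('subtitle', 120)],
-- }
--
--
-- def _truncate(s, n):
--     return s[:n - 3] + '...' if len(s) > n else s
--
--
-- def process_content_for_layout(content, layout):
--     """Process and truncate content based on layout to prevent overflow"""
--     processed = dict(content)
--     for field, limit in LAYOUT_LIMITS.get(layout, []):
--         if field in processed:
--             processed[field] = _truncate(processed[field], limit)
--     if layout == 'titleAndBullets' and 'bullets' in processed: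
--         processed['bullets'] = [_truncate(b, 100) for b in processed['bullets'][:5]]
--     return processed
-- ===== Notes on version B (the rewrite author's own statement) =====
-- stated objective: simpler
-- what changed: Replaces the five hand-written per-layout if-chains with one table (layout -> list of (field, limit) pairs) and a single truncate helper applied in a loop, keeping only the titleAndBullets bullet handling as an explicit special case. Pre_ excludes layout='titleAndBullets' with a 'bullets' key present, where on the string-typed content domain A returns a list of single characters for 'bullets' (not a value of the declared string type).
import Mathlib
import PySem

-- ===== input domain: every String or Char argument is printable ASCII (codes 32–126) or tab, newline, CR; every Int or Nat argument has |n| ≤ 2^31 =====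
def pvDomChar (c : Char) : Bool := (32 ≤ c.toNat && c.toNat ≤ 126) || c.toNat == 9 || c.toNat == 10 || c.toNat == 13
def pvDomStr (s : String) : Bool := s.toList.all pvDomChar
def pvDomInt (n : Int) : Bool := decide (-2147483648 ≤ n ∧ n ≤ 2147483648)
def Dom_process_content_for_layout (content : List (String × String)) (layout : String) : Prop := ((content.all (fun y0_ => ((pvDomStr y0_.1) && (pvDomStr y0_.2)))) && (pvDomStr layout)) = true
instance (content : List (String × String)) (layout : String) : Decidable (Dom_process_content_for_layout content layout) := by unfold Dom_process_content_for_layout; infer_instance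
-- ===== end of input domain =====

-- B simplifies A by driving the per-layout field truncation from a table instead of five hand-written if-chains.
-- Equivalence is about the RETURN value (the Python functions mutate nothing).

-- ===== PORT A =====
-- Literal transliteration of A: dict(content), then one if-chain per layout, one inline guarded truncation per field.
def process_content_for_layout (content : List (String × String)) (layout : String) : List (String × String) :=
  let processed := PySem.Dict.ofList content
  let processed :=
    if layout == "titleAndBullets" then
      let processed :=
        match processed.get? "title" with
        | some t => if PySem.Str.len t > 80 then processed.insert "title" (PySem.Str.slice t none (some 77) ++ "...") else processed
        | none => processed
      -- Python keeps at most 5 bullets, then truncates each at 100. On the string-typed content of this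
      -- file's domain each kept element is a single character (length 1 ≤ 100, left unchanged), so the value
      -- is represented by the 5-character prefix; Python itself returns it as a LIST of characters there —
      -- outside the declared value type — which is exactly what Pre_ excludes.
      match processed.get? "bullets" with
      | some b => processed.insert "bullets" (PySem.Str.slice b none (some 5))
      | none => processed
    else if layout == "quote" then
      let processed :=
        match processed.get? "quote" with
        | some t => if PySem.Str.len t > 150 then processed.insert "quote" (PySem.Str.slice t none (some 147) ++ "...") else processed
        | none => processed
      match processed.get? "author" with
      | some t => if PySem.Str.len t > 50 then processed.insert "author" (PySem.Str.slice t none (some 47) ++ "...") else processed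
      | none => processed
    else if layout == "imageAndParagraph" then
      let processed :=
        match processed.get? "title" with
        | some t => if PySem.Str.len t > 80 then processed.insert "title" (PySem.Str.slice t none (some 77) ++ "...") else processed
        | none => processed
      let processed :=
        match processed.get? "paragraph" with
        | some t => if PySem.Str.len t > 300 then processed.insert "paragraph" (PySem.Str.slice t none (some 297) ++ "...") else processed
        | none => processed
      match processed.get? "imageDescription" with
      | some t => if PySem.Str.len t > 100 then processed.insert "imageDescription" (PySem.Str.slice t none (some 97) ++ "...") else processed
      | none => processed
    else if layout == "twoColumn" then
      let processed :=
        match processed.get? "title" with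
        | some t => if PySem.Str.len t > 80 then processed.insert "title" (PySem.Str.slice t none (some 77) ++ "...") else processed
        | none => processed
      let processed :=
        match processed.get? "column1Title" with
        | some t => if PySem.Str.len t > 50 then processed.insert "column1Title" (PySem.Str.slice t none (some 47) ++ "...") else processed
        | none => processed
      let processed :=
        match processed.get? "column2Title" with
        | some t => if PySem.Str.len t > 50 then processed.insert "column2Title" (PySem.Str.slice t none (some 47) ++ "...") else processed
        | none => processed
      let processed :=
        match processed.get? "column1Content" with
        | some t => if PySem.Str.len t > 200 then processed.insert "column1Content" (PySem.Str.slice t none (some 197) ++ "...") else processed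
        | none => processed
      match processed.get? "column2Content" with
      | some t => if PySem.Str.len t > 200 then processed.insert "column2Content" (PySem.Str.slice t none (some 197) ++ "...") else processed
      | none => processed
    else if layout == "titleOnly" then
      let processed :=
        match processed.get? "title" with
        | some t => if PySem.Str.len t > 80 then processed.insert "title" (PySem.Str.slice t none (some 77) ++ "...") else processed
        | none => processed
      match processed.get? "subtitle" with
      | some t => if PySem.Str.len t > 120 then processed.insert "subtitle" (PySem.Str.slice t none (some 117) ++ "...") else processed
      | none => processed
    else processed
  processed.items

-- ===== PORT B =====
def pvTruncate (s : String) (n : Int) : String :=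
  if PySem.Str.len s > n then PySem.Str.slice s none (some (n - 3)) ++ "..." else s

def pvLayoutLimits : PySem.Dict String (List (String × Int)) :=
  PySem.Dict.ofList
    [ ("titleAndBullets", [("title", 80)]),
      ("quote", [("quote", 150), ("author", 50)]),
      ("imageAndParagraph", [("title", 80), ("paragraph", 300), ("imageDescription", 100)]),
      ("twoColumn", [("title", 80), ("column1Title", 50), ("column2Title", 50),
                     ("column1Content", 200), ("column2Content", 200)]),
      ("titleOnly", [("title", 80), ("subtitle", 120)]) ]

-- "if field in processed: processed[field] = _truncate(processed[field], limit)"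
def pvApplyLimit (d : PySem.Dict String String) (p : String × Int) : PySem.Dict String String :=
  match d.get? p.1 with
  | some v => d.insert p.1 (pvTruncate v p.2)
  | none => d

def process_content_for_layout_alt (content : List (String × String)) (layout : String) : List (String × String) :=
  let d := PySem.Dict.ofList content
  let d := (pvLayoutLimits.getD layout []).foldl pvApplyLimit d
  let d :=
    if layout == "titleAndBullets" then
      -- Source B: bullets[:5], then _truncate(b, 100) per kept bullet; on this file's string-typed domain every
      -- kept element is a single character, unchanged by _truncate, so the value is the 5-character prefix
      -- (Python returns a list of characters there; Pre_ excludes those inputs).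
      match d.get? "bullets" with
      | some b => d.insert "bullets" (PySem.Str.slice b none (some 5))
      | none => d
    else d
  d.items

-- ===== PRECONDITION & SPEC =====
-- Pre_ excludes layout = "titleAndBullets" with a "bullets" key present: there Python A returns, for
-- 'bullets', a LIST of single characters — not a value of the declared String type (B does the same).
def Pre_process_content_for_layout (content : List (String × String)) (layout : String) : Prop :=
  layout = "titleAndBullets" → "bullets" ∉ content.map Prod.fst
instance (content : List (String × String)) (layout : String) : Decidable (Pre_process_content_for_layout content layout) := by unfold Pre_process_content_for_layout; infer_instance

def pvWitness_process_content_for_layout : (List (String × String)) × String :=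
  ([("quote", "hello"), ("author", "me")], "quote")

def Spec_process_content_for_layout (content : List (String × String)) (layout : String) (out : List (String × String)) : Prop := out = process_content_for_layout_alt content layout
instance (content : List (String × String)) (layout : String) (out : List (String × String)) : Decidable (Spec_process_content_for_layout content layout out) := by unfold Spec_process_content_for_layout; infer_instance

-- ===== CLAIM (what is proved, stated in full; the proofs are below) =====
def Claim_equal_process_content_for_layout : Prop := ∀ (content : List (String × String)) (layout : String), Dom_process_content_for_layout content layout → Pre_process_content_for_layout content layout → Spec_process_content_for_layout content layout (process_content_for_layout content layout)

-- ===== LEMMAS AND PROOFS =====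

-- overwriting a key with the value it already holds changes nothing (keys unique)
theorem pv_insert_eq_self (d : PySem.Dict String String) (k t : String)
    (hnd : d.keys.Nodup) (h : d.get? k = some t) : d.insert k t = d := by
  apply PySem.Dict.ext
  rw [PySem.Dict.items_insert_of_contains d t (by rw [PySem.Dict.contains_eq_isSome_get?, h]; rfl)]
  conv_rhs => rw [← List.map_id d.items]
  apply List.map_congr_left
  intro p hp
  by_cases hpk : p.1 = k
  · have := PySem.Dict.get?_of_mem_items d (k := p.1) (v := p.2) (by simpa using hp) hnd
    rw [hpk, h] at this
    rw [if_pos (by simp [hpk])]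
    exact Prod.ext hpk.symm (Option.some_inj.mp this)
  · simp [hpk]

-- A's inline guarded truncation of one field equals B's pvApplyLimit step
theorem pv_step (d : PySem.Dict String String) (k : String) (n m : Int)
    (hm : m = n - 3) (hnd : d.keys.Nodup) :
    (match d.get? k with
     | some t => if PySem.Str.len t > n then d.insert k (PySem.Str.slice t none (some m) ++ "...") else d
     | none => d)
    = pvApplyLimit d (k, n) := by
  unfold pvApplyLimit
  cases h : d.get? k with
  | none => rfl
  | some t =>
    simp only [pvTruncate, ← hm]
    by_cases hl : PySem.Str.len t > n
    · rw [if_pos hl, if_pos hl]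
    · rw [if_neg hl, if_neg hl, pv_insert_eq_self d k t hnd h]

theorem pv_step_nodup (d : PySem.Dict String String) (p : String × Int)
    (hnd : d.keys.Nodup) : (pvApplyLimit d p).keys.Nodup := by
  unfold pvApplyLimit
  cases d.get? p.1 with
  | none => exact hnd
  | some t => exact PySem.Dict.nodup_keys_insert _ _ _ hnd

-- ===== VERDICT (by name: the statement is the Claim_ definition above) =====
theorem process_content_for_layout_spec : Claim_equal_process_content_for_layout := by
  intro content layout _ _
  unfold Spec_process_content_for_layout process_content_for_layout process_content_for_layout_alt
  have hnd0 : (PySem.Dict.ofList content).keys.Nodup := PySem.Dict.nodup_keys_ofList content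
  by_cases h1 : layout = "titleAndBullets"
  · subst h1
    simp only [BEq.rfl, if_pos]
    have hL : pvLayoutLimits.getD "titleAndBullets" [] = [("title", 80)] := by decide
    rw [hL]
    simp only [List.foldl]
    rw [pv_step _ _ 80 77 (by norm_num) hnd0]
  · by_cases h2 : layout = "quote"
    · subst h2
      simp only [reduceIte, String.reduceBEq, BEq.rfl]
      have hL : pvLayoutLimits.getD "quote" [] = [("quote", 150), ("author", 50)] := by decide
      rw [hL]
      simp only [List.foldl]
      rw [pv_step _ _ 150 147 (by norm_num) hnd0,
          pv_step _ _ 50 47 (by norm_num) (pv_step_nodup _ _ hnd0)]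
      simp
    · by_cases h3 : layout = "imageAndParagraph"
      · subst h3
        simp only [reduceIte, String.reduceBEq, BEq.rfl]
        have hL : pvLayoutLimits.getD "imageAndParagraph" []
            = [("title", 80), ("paragraph", 300), ("imageDescription", 100)] := by decide
        rw [hL]
        simp only [List.foldl]
        rw [pv_step _ _ 80 77 (by norm_num) hnd0,
            pv_step _ _ 300 297 (by norm_num) (pv_step_nodup _ _ hnd0),
            pv_step _ _ 100 97 (by norm_num) (pv_step_nodup _ _ (pv_step_nodup _ _ hnd0))]
        simp
      · by_cases h4 : layout = "twoColumn"
        · subst h4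
          simp only [reduceIte, String.reduceBEq, BEq.rfl]
          have hL : pvLayoutLimits.getD "twoColumn" []
              = [("title", 80), ("column1Title", 50), ("column2Title", 50),
                 ("column1Content", 200), ("column2Content", 200)] := by decide
          rw [hL]
          simp only [List.foldl]
          rw [pv_step _ _ 80 77 (by norm_num) hnd0,
              pv_step _ _ 50 47 (by norm_num) (pv_step_nodup _ _ hnd0),
              pv_step _ _ 50 47 (by norm_num) (pv_step_nodup _ _ (pv_step_nodup _ _ hnd0)),
              pv_step _ _ 200 197 (by norm_num) (pv_step_nodup _ _ (pv_step_nodup _ _ (pv_step_nodup _ _ hnd0))),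
              pv_step _ _ 200 197 (by norm_num) (pv_step_nodup _ _ (pv_step_nodup _ _ (pv_step_nodup _ _ (pv_step_nodup _ _ hnd0))))]
          simp
        · by_cases h5 : layout = "titleOnly"
          · subst h5
            simp only [reduceIte, String.reduceBEq, BEq.rfl]
            have hL : pvLayoutLimits.getD "titleOnly" [] = [("title", 80), ("subtitle", 120)] := by decide
            rw [hL]
            simp only [List.foldl]
            rw [pv_step _ _ 80 77 (by norm_num) hnd0,
                pv_step _ _ 120 117 (by norm_num) (pv_step_nodup _ _ hnd0)]
            simp
          · have hL : pvLayoutLimits.getD layout [] = [] := by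
              unfold pvLayoutLimits
              rw [show PySem.Dict.ofList
                  [ ("titleAndBullets", [(("title" : String), (80 : Int))]),
                    ("quote", [("quote", 150), ("author", 50)]),
                    ("imageAndParagraph", [("title", 80), ("paragraph", 300), ("imageDescription", 100)]),
                    ("twoColumn", [("title", 80), ("column1Title", 50), ("column2Title", 50),
                                   ("column1Content", 200), ("column2Content", 200)]),
                    ("titleOnly", [("title", 80), ("subtitle", 120)]) ]
                  = PySem.Dict.mk
                  [ ("titleAndBullets", [(("title" : String), (80 : Int))]),
                    ("quote", [("quote", 150), ("author", 50)]),
                    ("imageAndParagraph", [("title", 80), ("paragraph", 300), ("imageDescription", 100)]),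
                    ("twoColumn", [("title", 80), ("column1Title", 50), ("column2Title", 50),
                                   ("column1Content", 200), ("column2Content", 200)]),
                    ("titleOnly", [("title", 80), ("subtitle", 120)]) ] from by decide]
              simp [PySem.Dict.getD_eq_get?_getD, beq_iff_eq,
                    Ne.symm h1, Ne.symm h2, Ne.symm h3, Ne.symm h4, Ne.symm h5, PySem.Dict.get?]
            rw [hL]
            simp only [List.foldl]
            have b1 : (layout == "titleAndBullets") = false := by simp [h1]
            have b2 : (layout == "quote") = false := by simp [h2]
            have b3 : (layout == "imageAndParagraph") = false := by simp [h3]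
            have b4 : (layout == "twoColumn") = false := by simp [h4]
            have b5 : (layout == "titleOnly") = false := by simp [h5]
            rw [b1, b2, b3, b4, b5]
            simp
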